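-- pv_equiv track=rewrite | github.com/hamahasan441-png/Scanner- | modules/scapy_crawler.py | _match_os
-- ===== SOURCE A (Python) =====
-- from typing import Dict, List, Optional, Tuple
--
-- _OS_SIGNATURES: List[Dict] = [
--     {"os": "Linux",   "ttl_range": (60, 64),   "window_sizes": {5840, 14600, 29200, 65535}},
--     {"os": "Windows", "ttl_range": (125, 128),  "window_sizes": {8192, 16384, 65535}},
--     {"os": "macOS",   "ttl_range": (60, 64),    "window_sizes": {65535}},
--     {"os": "FreeBSD", "ttl_range": (60, 64),    "window_sizes": {65535}},
--     {"os": "Cisco",   "ttl_range": (252, 255),  "window_sizes": {4128}},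
--     {"os": "Solaris", "ttl_range": (252, 255),  "window_sizes": {8760, 33304}},
-- ]
--
-- def _match_os(ttl: int, window_size: int) -> str:
--     """Match TTL and window size against known OS signatures."""
--     candidates: List[Tuple[str, int]] = []
--     for sig in _OS_SIGNATURES:
--         score = 0
--         lo, hi = sig["ttl_range"]
--         if lo <= ttl <= hi:
--             score += 2
--         if window_size in sig["window_sizes"]:
--             score += 1
--         if score > 0:
--             candidates.append((sig["os"], score))
--
--     if not candidates:
--         return f"Unknown (TTL={ttl}, Win={window_size})"
--
--     candidates.sort(key=lambda c: c[1], reverse=True)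
--     best_os, best_score = candidates[0]
--     confidence = "high" if best_score >= 3 else "medium" if best_score == 2 else "low"
--     return f"{best_os} (confidence: {confidence}, TTL={ttl}, Win={window_size})"
-- ===== SOURCE B (Python) =====
-- def _match_os(ttl: int, window_size: int) -> str:
--     """Match TTL and window size against known OS signatures (decision table)."""
--     def fmt(os, conf):
--         return f"{os} (confidence: {conf}, TTL={ttl}, Win={window_size})"
--
--     if 60 <= ttl <= 64:
--         return fmt("Linux", "high" if window_size in (5840, 14600, 29200, 65535) else "medium")
--     if 125 <= ttl <= 128:
--         return fmt("Windows", "high" if window_size in (8192, 16384, 65535) else "medium")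
--     if 252 <= ttl <= 255:
--         if window_size == 4128:
--             return fmt("Cisco", "high")
--         if window_size in (8760, 33304):
--             return fmt("Solaris", "high")
--         return fmt("Cisco", "medium")
--     # TTL matches no range: a window-size match alone scores lowest; first signature wins.
--     if window_size in (5840, 14600, 29200, 65535):
--         return fmt("Linux", "low")
--     if window_size in (8192, 16384):
--         return fmt("Windows", "low")
--     if window_size == 4128:
--         return fmt("Cisco", "low")
--     if window_size in (8760, 33304):
--         return fmt("Solaris", "low")
--     return f"Unknown (TTL={ttl}, Win={window_size})"
-- ===== Notes on version B (the rewrite author's own statement) =====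
-- stated objective: simpler
-- what changed: Replaced building a (os, score) candidate list and stable-sorting it descending with a direct decision table: one branch per disjoint TTL range choosing the winning OS and confidence, plus an ordered window-only fallback chain; no list, no sort.
import Mathlib
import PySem

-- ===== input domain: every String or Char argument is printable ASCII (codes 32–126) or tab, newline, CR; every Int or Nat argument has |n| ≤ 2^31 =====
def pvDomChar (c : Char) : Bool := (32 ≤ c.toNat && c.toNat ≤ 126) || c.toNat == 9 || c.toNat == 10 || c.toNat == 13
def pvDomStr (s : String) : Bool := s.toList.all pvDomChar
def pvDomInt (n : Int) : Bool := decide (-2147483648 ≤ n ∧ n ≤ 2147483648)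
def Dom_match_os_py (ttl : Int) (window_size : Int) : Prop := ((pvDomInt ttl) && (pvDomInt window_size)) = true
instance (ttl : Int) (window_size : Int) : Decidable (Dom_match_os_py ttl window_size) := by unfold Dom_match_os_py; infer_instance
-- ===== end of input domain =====

-- B replaces the score-list-then-stable-sort selection by a direct decision table
-- over the three disjoint TTL ranges (objective: simpler).


-- ===== PORT A =====
-- _OS_SIGNATURES: (os, (lo, hi), window_sizes); python sets of int literals as PySem.Set
def pvOsSignatures : List (String × (Int × Int) × PySem.Set Int) :=
  [("Linux",   (60, 64),   PySem.Set.ofList [5840, 14600, 29200, 65535]),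
   ("Windows", (125, 128), PySem.Set.ofList [8192, 16384, 65535]),
   ("macOS",   (60, 64),   PySem.Set.ofList [65535]),
   ("FreeBSD", (60, 64),   PySem.Set.ofList [65535]),
   ("Cisco",   (252, 255), PySem.Set.ofList [4128]),
   ("Solaris", (252, 255), PySem.Set.ofList [8760, 33304])]

def match_os_py (ttl : Int) (window_size : Int) : String :=
  let candidates : List (String × Int) :=
    pvOsSignatures.foldl (fun acc sig =>
      let score : Int := 0
      let lo := sig.2.1.1
      let hi := sig.2.1.2
      let score := if lo ≤ ttl ∧ ttl ≤ hi then score + 2 else score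
      let score := if PySem.Set.contains sig.2.2 window_size then score + 1 else score
      if score > 0 then acc ++ [(sig.1, score)] else acc) []
  if candidates = [] then
    "Unknown (TTL=" ++ PySem.Int.toStr ttl ++ ", Win=" ++ PySem.Int.toStr window_size ++ ")"
  else
    let sortedC := PySem.List.sorted candidates (fun c => c.2) true
    let best := sortedC.headD ("", 0)  -- candidates[0]; candidates is nonempty here
    let best_os := best.1
    let best_score := best.2
    let confidence := if best_score ≥ 3 then "high" else if best_score = 2 then "medium" else "low"
    best_os ++ " (confidence: " ++ confidence ++ ", TTL=" ++ PySem.Int.toStr ttl ++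
      ", Win=" ++ PySem.Int.toStr window_size ++ ")"

-- ===== PORT B =====
def pvFmt (ttl window_size : Int) (os conf : String) : String :=
  os ++ " (confidence: " ++ conf ++ ", TTL=" ++ PySem.Int.toStr ttl ++
    ", Win=" ++ PySem.Int.toStr window_size ++ ")"

def match_os_py_alt (ttl : Int) (window_size : Int) : String :=
  if 60 ≤ ttl ∧ ttl ≤ 64 then
    pvFmt ttl window_size "Linux"
      (if window_size ∈ ([5840, 14600, 29200, 65535] : List Int) then "high" else "medium")
  else if 125 ≤ ttl ∧ ttl ≤ 128 then
    pvFmt ttl window_size "Windows"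
      (if window_size ∈ ([8192, 16384, 65535] : List Int) then "high" else "medium")
  else if 252 ≤ ttl ∧ ttl ≤ 255 then
    if window_size = 4128 then pvFmt ttl window_size "Cisco" "high"
    else if window_size ∈ ([8760, 33304] : List Int) then pvFmt ttl window_size "Solaris" "high"
    else pvFmt ttl window_size "Cisco" "medium"
  else
    if window_size ∈ ([5840, 14600, 29200, 65535] : List Int) then pvFmt ttl window_size "Linux" "low"
    else if window_size ∈ ([8192, 16384] : List Int) then pvFmt ttl window_size "Windows" "low"
    else if window_size = 4128 then pvFmt ttl window_size "Cisco" "low"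
    else if window_size ∈ ([8760, 33304] : List Int) then pvFmt ttl window_size "Solaris" "low"
    else "Unknown (TTL=" ++ PySem.Int.toStr ttl ++ ", Win=" ++ PySem.Int.toStr window_size ++ ")"

-- ===== PRECONDITION & SPEC =====
def Spec_match_os_py (ttl : Int) (window_size : Int) (out : String) : Prop := out = match_os_py_alt ttl window_size
instance (ttl : Int) (window_size : Int) (out : String) : Decidable (Spec_match_os_py ttl window_size out) := by unfold Spec_match_os_py; infer_instance

-- ===== CLAIM (what is proved, stated in full; the proofs are below) =====
def Claim_equal_match_os_py : Prop := ∀ (ttl : Int) (window_size : Int), Dom_match_os_py ttl window_size → Spec_match_os_py ttl window_size (match_os_py ttl window_size)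

-- ===== LEMMAS AND PROOFS =====

set_option maxHeartbeats 4000000 in
theorem match_os_py_eq_alt (ttl window_size : Int) :
    match_os_py ttl window_size = match_os_py_alt ttl window_size := by
  have hw : window_size = 5840 ∨ window_size = 14600 ∨ window_size = 29200 ∨
      window_size = 65535 ∨ window_size = 8192 ∨ window_size = 16384 ∨
      window_size = 4128 ∨ window_size = 8760 ∨ window_size = 33304 ∨
      (window_size ≠ 5840 ∧ window_size ≠ 14600 ∧ window_size ≠ 29200 ∧
       window_size ≠ 65535 ∧ window_size ≠ 8192 ∧ window_size ≠ 16384 ∧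
       window_size ≠ 4128 ∧ window_size ≠ 8760 ∧ window_size ≠ 33304) := by omega
  by_cases h1 : 60 ≤ ttl ∧ ttl ≤ 64
  · obtain ⟨hlo, hhi⟩ := h1
    interval_cases ttl <;>
      (rcases hw with hb|hb|hb|hb|hb|hb|hb|hb|hb|hb <;>
        first
          | (subst hb; decide)
          | (norm_num [match_os_py, match_os_py_alt, pvFmt, pvOsSignatures,
              PySem.Set.contains_eq_listContains, PySem.Set.ofList, PySem.Set.add,
              List.contains_eq_mem, PySem.List.sorted, PySem.List.insertBy, hb] <;> simp))
  · by_cases h2 : 125 ≤ ttl ∧ ttl ≤ 128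
    · obtain ⟨hlo, hhi⟩ := h2
      interval_cases ttl <;>
        (rcases hw with hb|hb|hb|hb|hb|hb|hb|hb|hb|hb <;>
        first
          | (subst hb; decide)
          | (norm_num [match_os_py, match_os_py_alt, pvFmt, pvOsSignatures,
              PySem.Set.contains_eq_listContains, PySem.Set.ofList, PySem.Set.add,
              List.contains_eq_mem, PySem.List.sorted, PySem.List.insertBy, hb] <;> simp))
    · by_cases h3 : 252 ≤ ttl ∧ ttl ≤ 255
      · obtain ⟨hlo, hhi⟩ := h3
        interval_cases ttl <;>
          (rcases hw with hb|hb|hb|hb|hb|hb|hb|hb|hb|hb <;>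
        first
          | (subst hb; decide)
          | (norm_num [match_os_py, match_os_py_alt, pvFmt, pvOsSignatures,
              PySem.Set.contains_eq_listContains, PySem.Set.ofList, PySem.Set.add,
              List.contains_eq_mem, PySem.List.sorted, PySem.List.insertBy, hb] <;> simp))
      · rcases hw with hb|hb|hb|hb|hb|hb|hb|hb|hb|hb <;>
          first
            | (subst hb;
               norm_num [match_os_py, match_os_py_alt, pvFmt, pvOsSignatures,
                 List.foldl_cons, List.foldl_nil, if_neg h1, if_neg h2, if_neg h3,
                 PySem.Set.contains_eq_listContains, PySem.Set.ofList, PySem.Set.add,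
                 PySem.List.sorted, PySem.List.insertBy] <;> simp)
            | (norm_num [match_os_py, match_os_py_alt, pvFmt, pvOsSignatures,
                 List.foldl_cons, List.foldl_nil, if_neg h1, if_neg h2, if_neg h3,
                 PySem.Set.contains_eq_listContains, PySem.Set.ofList, PySem.Set.add,
                 List.contains_eq_mem, PySem.List.sorted, PySem.List.insertBy, hb] <;> simp)

-- ===== VERDICT (by name: the statement is the Claim_ definition above) =====
theorem match_os_py_spec : Claim_equal_match_os_py := by
  intro ttl window_size _
  unfold Spec_match_os_py
  exact match_os_py_eq_alt ttl window_size
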